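-- pv_equiv track=rewrite | github.com/sylviancadars/pyama | utils.py | cyclic_permutations
-- ===== SOURCE A (Python) =====
-- def cyclic_permutations(lst, direction='right'):
--     """
--     Return a list of all cyclic permutations of lst, starting with lst itself.
--
--     Args:
--         lst: list or tuple
--         direction: 'right' for right cyclic permutations (default), 'left' for left cyclic permutations
--
--     Returns:
--         A list of lists or a list of tuples.
--     """
--     permutations = [lst[:]]  # Add the original list as the first permutation
--
--     for i in range(1, len(lst)):
--         if direction == 'left':
--             lst = lst[-1:] + lst[:-1]  # Perform a right cyclic shift
--         elif direction == 'right':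
--             lst = lst[1:] + lst[:1]  # Perform a left cyclic shift
--         else:
--             raise ValueError("Direction must be either 'right' or 'left'.")
--
--         permutations.append(lst[:])  # Add a copy of the shifted list
--
--     return permutations
-- ===== SOURCE B (Python) =====
-- def cyclic_permutations(lst, direction='right'):
--     """Build each cyclic permutation as a length-n window into lst+lst."""
--     n = len(lst)
--     permutations = [lst[:]]
--     doubled = lst + lst
--     for i in range(1, n):
--         if direction == 'left':
--             permutations.append(doubled[n - i:2 * n - i])
--         elif direction == 'right':
--             permutations.append(doubled[i:i + n])
--         else:
--             raise ValueError("Direction must be either 'right' or 'left'.")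
--     return permutations
-- ===== Notes on version B (the rewrite author's own statement) =====
-- stated objective: alternative
-- what changed: B replaces A's step-by-step rebinding of the rotated list with a build-once doubled list lst+lst from which each cyclic permutation is read off as a length-n slice window.
import Mathlib
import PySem

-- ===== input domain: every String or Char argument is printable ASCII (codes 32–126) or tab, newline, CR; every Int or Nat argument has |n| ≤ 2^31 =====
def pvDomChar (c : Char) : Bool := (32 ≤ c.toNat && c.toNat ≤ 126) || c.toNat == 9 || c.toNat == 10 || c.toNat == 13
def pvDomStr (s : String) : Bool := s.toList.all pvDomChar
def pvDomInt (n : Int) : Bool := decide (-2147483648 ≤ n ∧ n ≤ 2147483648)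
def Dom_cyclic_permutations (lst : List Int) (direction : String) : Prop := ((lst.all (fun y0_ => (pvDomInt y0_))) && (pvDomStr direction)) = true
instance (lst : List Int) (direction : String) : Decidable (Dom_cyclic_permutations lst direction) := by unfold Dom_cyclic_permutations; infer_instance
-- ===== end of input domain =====

-- B builds each cyclic permutation as a length-n window into lst ++ lst instead of A's incremental rebinding; objective: alternative.

-- ===== PORT A =====
-- state: (current list `lst`, accumulated `permutations`); the else-branch raises in Python (excluded by Pre_),
-- the port leaves the state unchanged there.
def cyclic_permutations (lst : List Int) (direction : String) : List (List Int) :=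
  ((PySem.List.pyRange 1 (lst.length : Int) 1).foldl
    (fun (st : List Int × List (List Int)) _ =>
      if direction == "left" then
        let l := PySem.List.slice st.1 (some (-1)) none ++ PySem.List.slice st.1 none (some (-1))
        (l, st.2 ++ [l])
      else if direction == "right" then
        let l := PySem.List.slice st.1 (some 1) none ++ PySem.List.slice st.1 none (some 1)
        (l, st.2 ++ [l])
      else (st.1, st.2))
    (lst, [lst])).2

-- ===== PORT B =====
def cyclic_permutations_alt (lst : List Int) (direction : String) : List (List Int) :=
  let n : Int := lst.length
  let doubled := lst ++ lst
  (PySem.List.pyRange 1 n 1).foldl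
    (fun perms i =>
      if direction == "left" then
        perms ++ [PySem.List.slice doubled (some (n - i)) (some (2 * n - i))]
      else if direction == "right" then
        perms ++ [PySem.List.slice doubled (some i) (some (i + n))]
      else perms)
    [lst]

-- ===== PRECONDITION & SPEC =====
-- Pre_ excludes exactly the inputs where A raises ValueError: an invalid direction together with len(lst) >= 2.
def Pre_cyclic_permutations (lst : List Int) (direction : String) : Prop :=
  direction = "left" ∨ direction = "right" ∨ lst.length ≤ 1
instance (lst : List Int) (direction : String) : Decidable (Pre_cyclic_permutations lst direction) := by unfold Pre_cyclic_permutations; infer_instance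
def pvWitness_cyclic_permutations : List Int × String := ([1, 2, 3], "right")

def Spec_cyclic_permutations (lst : List Int) (direction : String) (out : List (List Int)) : Prop := out = cyclic_permutations_alt lst direction
instance (lst : List Int) (direction : String) (out : List (List Int)) : Decidable (Spec_cyclic_permutations lst direction out) := by unfold Spec_cyclic_permutations; infer_instance

-- ===== CLAIM (what is proved, stated in full; the proofs are below) =====
def Claim_equal_cyclic_permutations : Prop := ∀ (lst : List Int) (direction : String), Dom_cyclic_permutations lst direction → Pre_cyclic_permutations lst direction → Spec_cyclic_permutations lst direction (cyclic_permutations lst direction)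

-- ===== LEMMAS AND PROOFS =====

-- a length-n window into lst ++ lst at offset k is the k-th cyclic permutation
lemma window_eq (lst : List Int) (k : Nat) (hk : k ≤ lst.length) :
    PySem.List.slice (lst ++ lst) (some (k : Int)) (some ((k : Int) + (lst.length : Int)))
      = lst.rotate k := by
  rw [show ((k : Int) + (lst.length : Int)) = ((k + lst.length : Nat) : Int) by push_cast; ring,
      PySem.List.slice_natCast, List.drop_append_of_le_length hk,
      show k + lst.length - k = lst.length by omega, List.take_append,
      List.take_of_length_le (by simp), List.rotate_eq_drop_append_take hk]
  congr 2
  simp; omega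

-- Python's lst[1:] + lst[:1] is a single left rotation
lemma rot_right_step (l : List Int) (h : l ≠ []) :
    l.tail ++ l.take 1 = l.rotate 1 := by
  cases l with
  | nil => simp at h
  | cons a t => simp [List.rotate_cons_succ]

-- the joint invariant for direction 'right': after folding range(1, m+1),
-- A's state is (lst.rotate m, B's permutation list over the same range)
lemma inv_right (lst : List Int) (m : Nat) (hm : m + 1 ≤ lst.length) :
    (PySem.List.pyRange 1 ((m : Int) + 1) 1).foldl
      (fun (st : List Int × List (List Int)) _ =>
        let l := PySem.List.slice st.1 (some 1) none ++ PySem.List.slice st.1 none (some 1)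
        (l, st.2 ++ [l]))
      (lst, [lst])
    = (lst.rotate m,
       (PySem.List.pyRange 1 ((m : Int) + 1) 1).foldl
         (fun perms i =>
           perms ++ [PySem.List.slice (lst ++ lst) (some i) (some (i + (lst.length : Int)))])
         [lst]) := by
  induction m with
  | zero => simp [PySem.List.pyRange_one_eq_nil]
  | succ k ih =>
      have hk : k + 1 ≤ lst.length := by omega
      have hrange : PySem.List.pyRange 1 ((k : Int) + 1 + 1) 1
          = PySem.List.pyRange 1 ((k : Int) + 1) 1 ++ [(k : Int) + 1] := by
        have := PySem.List.pyRange_one_succ_right (a := 1) (b := (k : Int) + 1) (by omega)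
        simpa using this
      rw [show ((k + 1 : Nat) : Int) + 1 = (k : Int) + 1 + 1 by push_cast; ring, hrange,
          List.foldl_append, List.foldl_append, ih hk]
      simp only [List.foldl_cons, List.foldl_nil]
      have hne : lst.rotate k ≠ [] := by
        intro h
        rw [List.rotate_eq_nil_iff] at h
        rw [h] at hm
        simp at hm
      have hslice1 : PySem.List.slice (lst.rotate k) (some 1) none
          = (lst.rotate k).tail := PySem.List.slice_from_one _
      have hslice2 : PySem.List.slice (lst.rotate k) none (some 1)
          = (lst.rotate k).take 1 := by
        have := PySem.List.slice_to_natCast (xs := lst.rotate k) (b := 1)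
        simpa using this
      have hw : PySem.List.slice (lst ++ lst) (some ((k : Int) + 1))
            (some ((k : Int) + 1 + (lst.length : Int)))
          = lst.rotate (k + 1) := by
        have := window_eq lst (k + 1) (by omega)
        simpa [Int.natCast_add] using this
      rw [hslice1, hslice2, rot_right_step _ hne, List.rotate_rotate, hw]

-- the joint invariant for direction 'left': A's state is lst.rotate (n - m)
lemma inv_left (lst : List Int) (m : Nat) (hm : m + 1 ≤ lst.length) :
    (PySem.List.pyRange 1 ((m : Int) + 1) 1).foldl
      (fun (st : List Int × List (List Int)) _ =>
        let l := PySem.List.slice st.1 (some (-1)) none ++ PySem.List.slice st.1 none (some (-1))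
        (l, st.2 ++ [l]))
      (lst, [lst])
    = (lst.rotate (lst.length - m),
       (PySem.List.pyRange 1 ((m : Int) + 1) 1).foldl
         (fun perms i =>
           perms ++ [PySem.List.slice (lst ++ lst) (some ((lst.length : Int) - i))
             (some (2 * (lst.length : Int) - i))])
         [lst]) := by
  induction m with
  | zero => simp [PySem.List.pyRange_one_eq_nil, List.rotate_length]
  | succ k ih =>
      have hk : k + 1 ≤ lst.length := by omega
      have hrange : PySem.List.pyRange 1 ((k : Int) + 1 + 1) 1
          = PySem.List.pyRange 1 ((k : Int) + 1) 1 ++ [(k : Int) + 1] := by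
        have := PySem.List.pyRange_one_succ_right (a := 1) (b := (k : Int) + 1) (by omega)
        simpa using this
      rw [show ((k + 1 : Nat) : Int) + 1 = (k : Int) + 1 + 1 by push_cast; ring, hrange,
          List.foldl_append, List.foldl_append, ih hk]
      simp only [List.foldl_cons, List.foldl_nil]
      have hlenr : (lst.rotate (lst.length - k)).length = lst.length := by simp
      have hslice1 : PySem.List.slice (lst.rotate (lst.length - k)) (some (-1)) none
          = (lst.rotate (lst.length - k)).drop ((lst.rotate (lst.length - k)).length - 1) :=
        PySem.List.slice_from_neg_one _
      have hslice2 : PySem.List.slice (lst.rotate (lst.length - k)) none (some (-1))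
          = (lst.rotate (lst.length - k)).dropLast := PySem.List.slice_to_neg_one _
      -- lst[-1:] + lst[:-1] is a rotation by length - 1
      have hrot : (lst.rotate (lst.length - k)).drop ((lst.rotate (lst.length - k)).length - 1)
            ++ (lst.rotate (lst.length - k)).dropLast
          = lst.rotate (lst.length - (k + 1)) := by
        rw [List.dropLast_eq_take, hlenr,
            ← List.rotate_eq_drop_append_take
              (by rw [hlenr]; omega : lst.length - 1 ≤ (lst.rotate (lst.length - k)).length),
            List.rotate_rotate,
            show lst.length - k + (lst.length - 1) = lst.length - (k + 1) + lst.length by omega,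
            ← List.rotate_mod, Nat.add_mod_right, Nat.mod_eq_of_lt (by omega)]
      rw [hslice1, hslice2]
      have hw : PySem.List.slice (lst ++ lst) (some ((lst.length : Int) - ((k : Int) + 1)))
            (some (2 * (lst.length : Int) - ((k : Int) + 1)))
          = lst.rotate (lst.length - (k + 1)) := by
        have h1 : ((lst.length : Int) - ((k : Int) + 1)) = ((lst.length - (k + 1) : Nat) : Int) := by
          omega
        have h2 : (2 * (lst.length : Int) - ((k : Int) + 1))
            = ((lst.length - (k + 1) : Nat) : Int) + (lst.length : Int) := by omega
        rw [h1, h2]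
        exact window_eq lst (lst.length - (k + 1)) (by omega)
      rw [hrot, hw]

-- ===== VERDICT (by name: the statement is the Claim_ definition above) =====
theorem cyclic_permutations_spec : Claim_equal_cyclic_permutations := by
  intro lst direction _ hpre
  unfold Spec_cyclic_permutations cyclic_permutations cyclic_permutations_alt
  by_cases hlen : lst.length ≤ 1
  · have : PySem.List.pyRange 1 (lst.length : Int) 1 = [] :=
      PySem.List.pyRange_one_eq_nil (by exact_mod_cast hlen)
    simp [this]
  · obtain ⟨m, hm⟩ : ∃ m : Nat, lst.length = m + 1 := ⟨lst.length - 1, by omega⟩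
    rcases hpre with h | h | h
    · subst h
      simp only [show (("left" : String) == "left") = true from rfl, if_true]
      rw [show (lst.length : Int) = (m : Int) + 1 by omega, inv_left lst m (by omega)]
      simp [hm]
    · subst h
      simp only [show (("right" : String) == "left") = false from rfl, Bool.false_eq_true,
        if_false, show (("right" : String) == "right") = true from rfl, if_true]
      rw [show (lst.length : Int) = (m : Int) + 1 by omega, inv_right lst m (by omega)]
      simp [hm]
    · omega
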